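-- pv_equiv track=rewrite | github.com/BlinkVoid/MemCore | benchmarks/bench_token_savings.py | generate_memory_variations
-- ===== SOURCE A (Python) =====
-- from typing import Dict, List, Any
--
-- def generate_memory_variations(base_content: str, count: int) -> List[str]:
--     """Generate variations of a memory with slight modifications."""
--     variations = []
--     modifiers = [
--         " [Updated]", " [Confirmed]", " [Priority]", " [Reviewed]",
--         " v2.0", " (final)", " - approved", " [2024-Q3]",
--     ]
--
--     for i in range(count):
--         mod = modifiers[i % len(modifiers)]
--         variation = base_content + f"\n\nNote: {mod.strip(' []')}"
--         variations.append(variation)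
--
--     return variations
-- ===== SOURCE B (Python) =====
-- def generate_memory_variations(base_content: str, count: int) -> list:
--     """Generate variations: precompute the 8 annotated blocks, then tile and slice."""
--     suffixes = ["Updated", "Confirmed", "Priority", "Reviewed",
--                 "v2.0", "(final)", "- approved", "2024-Q3"]
--     blocks = [f"{base_content}\n\nNote: {s}" for s in suffixes]
--     n = max(0, count)
--     return blocks * (n // 8) + blocks[: n % 8]
-- ===== Notes on version B (the rewrite author's own statement) =====
-- stated objective: simpler
-- what changed: B precomputes the 8 annotated block strings once and builds the result by list tiling and slicing (blocks*(n//8)+blocks[:n%8]) instead of A's per-index loop that re-strips a modifier on every iteration.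
import Mathlib
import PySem

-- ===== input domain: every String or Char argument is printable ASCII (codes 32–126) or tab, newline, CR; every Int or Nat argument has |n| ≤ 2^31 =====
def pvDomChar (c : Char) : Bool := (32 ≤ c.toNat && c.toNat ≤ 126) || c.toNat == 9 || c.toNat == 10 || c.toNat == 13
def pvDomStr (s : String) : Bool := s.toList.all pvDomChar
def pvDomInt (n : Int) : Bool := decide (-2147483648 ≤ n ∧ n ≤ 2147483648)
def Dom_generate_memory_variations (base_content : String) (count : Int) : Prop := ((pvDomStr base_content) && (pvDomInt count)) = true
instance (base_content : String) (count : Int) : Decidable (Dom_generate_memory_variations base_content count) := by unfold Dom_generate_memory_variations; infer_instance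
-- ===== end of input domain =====

-- B precomputes the 8 annotated block strings once and builds the result by tiling and slicing instead of A's per-index loop.

-- ===== PORT A =====
def generate_memory_variations (base_content : String) (count : Int) : List String :=
  let modifiers : List String :=
    [" [Updated]", " [Confirmed]", " [Priority]", " [Reviewed]",
     " v2.0", " (final)", " - approved", " [2024-Q3]"]
  (PySem.List.pyRange 0 count 1).foldl
    (fun variations i =>
      -- i % len(modifiers) is always in range, so the total indexing form is exact here
      let m := PySem.List.pyGetD modifiers (PySem.Int.mod i (modifiers.length : Int)) ""
      let variation := base_content ++ "\n\nNote: " ++ PySem.Str.stripChars m " []"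
      variations ++ [variation]) []

-- ===== PORT B =====
def generate_memory_variations_alt (base_content : String) (count : Int) : List String :=
  let suffixes : List String :=
    ["Updated", "Confirmed", "Priority", "Reviewed",
     "v2.0", "(final)", "- approved", "2024-Q3"]
  let blocks := suffixes.map (fun s => base_content ++ "\n\nNote: " ++ s)
  let n := max 0 count
  PySem.List.pyRepeat blocks (PySem.Int.floordiv n 8) ++
    PySem.List.slice blocks none (some (PySem.Int.mod n 8))

-- ===== PRECONDITION & SPEC =====
def Spec_generate_memory_variations (base_content : String) (count : Int) (out : List String) : Prop := out = generate_memory_variations_alt base_content count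
instance (base_content : String) (count : Int) (out : List String) : Decidable (Spec_generate_memory_variations base_content count out) := by unfold Spec_generate_memory_variations; infer_instance

-- ===== CLAIM (what is proved, stated in full; the proofs are below) =====
def Claim_equal_generate_memory_variations : Prop := ∀ (base_content : String) (count : Int), Dom_generate_memory_variations base_content count → Spec_generate_memory_variations base_content count (generate_memory_variations base_content count)

-- ===== LEMMAS AND PROOFS =====

-- tiling: indexing a length-8 list cyclically over range m is (m/8) full copies plus the first m%8 elements
lemma tile_eq {α : Type} (bs : List α) (d : α) (hbs : bs.length = 8) :
    ∀ m : Nat, (List.range m).map (fun k => bs.getD (k % 8) d)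
      = (List.replicate (m / 8) bs).flatten ++ bs.take (m % 8) := by
  intro m
  induction m with
  | zero => simp
  | succ m ih =>
    rw [List.range_succ, List.map_append, ih]
    by_cases h : m % 8 = 7
    · have hd : (m + 1) / 8 = m / 8 + 1 := by omega
      have hm : (m + 1) % 8 = 0 := by omega
      rw [hd, hm, List.replicate_succ', List.flatten_append]
      have hb : bs = bs.take 7 ++ [bs.getD 7 d] := by
        have h7 : bs.getD 7 d = bs[7]'(by omega) := List.getD_eq_getElem bs d (by omega)
        have hd7 : bs.drop 7 = [bs[7]'(by omega)] := by
          rw [List.drop_eq_getElem_cons (by omega)]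
          have : bs.drop 8 = [] := List.drop_of_length_le (by omega)
          simp [this]
        rw [h7, ← hd7, List.take_append_drop]
      simp only [List.map_singleton, h]
      rw [List.append_assoc, List.append_assoc]
      congr 1
      simp only [List.flatten_singleton, List.take_zero, List.append_nil]
      exact hb.symm
    · have hd : (m + 1) / 8 = m / 8 := by omega
      have hm : (m + 1) % 8 = m % 8 + 1 := by omega
      rw [hd, hm, List.append_assoc]
      congr 1
      rw [List.take_add_one]
      simp [List.getElem?_eq_getElem (show m % 8 < bs.length by omega)]

-- the stripped modifiers are exactly B's suffixes
lemma strip_mods :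
    ([" [Updated]", " [Confirmed]", " [Priority]", " [Reviewed]",
      " v2.0", " (final)", " - approved", " [2024-Q3]"] : List String).map
        (fun s => PySem.Str.stripChars s " []")
      = ["Updated", "Confirmed", "Priority", "Reviewed",
         "v2.0", "(final)", "- approved", "2024-Q3"] := by decide

-- ===== VERDICT (by name: the statement is the Claim_ definition above) =====
theorem generate_memory_variations_spec : Claim_equal_generate_memory_variations := by
  intro base_content count _
  unfold Spec_generate_memory_variations generate_memory_variations generate_memory_variations_alt
  simp only []
  set mods : List String :=
    [" [Updated]", " [Confirmed]", " [Priority]", " [Reviewed]",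
     " v2.0", " (final)", " - approved", " [2024-Q3]"] with hmods
  set sufs : List String :=
    ["Updated", "Confirmed", "Priority", "Reviewed",
     "v2.0", "(final)", "- approved", "2024-Q3"] with hsufs
  have hlen : (mods.length : Int) = 8 := by rw [hmods]; decide
  rw [PySem.List.foldl_append_singleton_eq_map, List.nil_append]
  by_cases hc : count ≤ 0
  · rw [PySem.List.pyRange_one_eq_nil hc]
    have hn : max 0 count = 0 := by omega
    rw [hn]
    simp [PySem.List.pyRepeat, PySem.Int.floordiv, PySem.Int.mod, PySem.List.slice]
  · -- count = ↑m with m : Nat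
    obtain ⟨m, hm⟩ : ∃ m : Nat, count = (m : Int) := ⟨count.toNat, by omega⟩
    subst hm
    have hn : max 0 ((m : Nat) : Int) = (m : Int) := by omega
    have hfd : PySem.Int.floordiv ((m : Nat) : Int) 8 = ((m / 8 : Nat) : Int) := by
      exact_mod_cast PySem.Int.floordiv_natCast m 8
    have hmd : PySem.Int.mod ((m : Nat) : Int) 8 = ((m % 8 : Nat) : Int) := by
      exact_mod_cast PySem.Int.mod_natCast m 8
    rw [hn, hfd, hmd, PySem.List.slice_to_natCast]
    have hA : (PySem.List.pyRange 0 ((m : Nat) : Int) 1).map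
        (fun i => base_content ++ "\n\nNote: " ++
          PySem.Str.stripChars (PySem.List.pyGetD mods (PySem.Int.mod i (mods.length : Int)) "") " []")
        = (List.range m).map (fun k : Nat => base_content ++ "\n\nNote: " ++
            PySem.Str.stripChars (PySem.List.pyGetD mods (PySem.Int.mod ((k : Nat) : Int) (mods.length : Int)) "") " []") := by
      rw [PySem.List.pyRange_zero_nat m, List.map_map]; rfl
    rw [hA]
    set blocks := sufs.map (fun s => base_content ++ "\n\nNote: " ++ s) with hblocks
    have hblen : blocks.length = 8 := by rw [hblocks, List.length_map, hsufs]; rfl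
    have hmlen : mods.length = 8 := by rw [hmods]; rfl
    have hfun : ∀ k : Nat,
        base_content ++ "\n\nNote: " ++
            PySem.Str.stripChars (PySem.List.pyGetD mods (PySem.Int.mod ((k : Nat) : Int) (mods.length : Int)) "") " []"
        = blocks.getD (k % 8) (base_content ++ "\n\nNote: " ++ "") := by
      intro k
      have hk8 : k % 8 < 8 := by omega
      have hmk : PySem.Int.mod ((k : Nat) : Int) ((mods.length : Nat) : Int) = ((k % 8 : Nat) : Int) := by
        rw [hmlen]; exact PySem.Int.mod_natCast k 8
      rw [hmk, PySem.List.pyGetD_natCast]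
      rw [List.getD_eq_getElem mods "" (by omega),
          List.getD_eq_getElem blocks _ (by omega)]
      simp only [hblocks, List.getElem_map]
      congr 1
      have := congrArg (fun l => l[k % 8]?) strip_mods
      simp only [List.getElem?_map] at this
      rw [← hmods, ← hsufs] at this
      have h1 : mods[k % 8]? = some (mods[k % 8]'(by omega)) :=
        List.getElem?_eq_getElem _
      have h2 : sufs[k % 8]? = some (sufs[k % 8]'(by rw [hsufs]; simpa using hk8)) :=
        List.getElem?_eq_getElem _
      rw [h1, h2] at this
      simpa using this
    rw [List.map_congr_left (fun k _ => hfun k)]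
    rw [tile_eq blocks _ hblen m]
    rfl
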